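-- pv_equiv track=rewrite | github.com/jeff87654/Lifting | verify_s17_cycles.py | orbit_type_from_cycles
-- ===== SOURCE A (Python) =====
-- from collections import defaultdict
--
-- def orbit_type_from_cycles(gen_cycle_lists, n=17):
--     """Compute orbit type from list of generators (each a list of cycles)."""
--     parent = list(range(n + 1))
--
--     def find(x):
--         while parent[x] != x:
--             parent[x] = parent[parent[x]]
--             x = parent[x]
--         return x
--
--     def union(a, b):
--         a, b = find(a), find(b)
--         if a != b:
--             parent[b] = a
--
--     for cycles in gen_cycle_lists:
--         for cycle in cycles:
--             for k in range(len(cycle) - 1):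
--                 union(cycle[k], cycle[k + 1])
--
--     sizes = defaultdict(int)
--     for i in range(1, n + 1):
--         sizes[find(i)] += 1
--     return tuple(sorted(sizes.values(), reverse=True))
-- ===== SOURCE B (Python) =====
-- def orbit_type_from_cycles(gen_cycle_lists, n=17):
--     """Compute orbit type from list of generators (each a list of cycles)."""
--     comp = list(range(n + 1))
--     for cycles in gen_cycle_lists:
--         for cycle in cycles:
--             for a, b in zip(cycle, cycle[1:]):
--                 ca, cb = comp[a], comp[b]
--                 if ca != cb:
--                     comp = [ca if c == cb else c for c in comp]
--     counts = {}
--     for i in range(1, n + 1):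
--         counts[comp[i]] = counts.get(comp[i], 0) + 1
--     return tuple(sorted(counts.values(), reverse=True))
-- ===== Notes on version B (the rewrite author's own statement) =====
-- stated objective: alternative
-- what changed: Replaces A's path-compressed union-find (parent forest with find/union) by a flat component-label array that is fully relabelled on each merging edge and then counted with one dict pass, removing the find/union machinery entirely.
import Mathlib
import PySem

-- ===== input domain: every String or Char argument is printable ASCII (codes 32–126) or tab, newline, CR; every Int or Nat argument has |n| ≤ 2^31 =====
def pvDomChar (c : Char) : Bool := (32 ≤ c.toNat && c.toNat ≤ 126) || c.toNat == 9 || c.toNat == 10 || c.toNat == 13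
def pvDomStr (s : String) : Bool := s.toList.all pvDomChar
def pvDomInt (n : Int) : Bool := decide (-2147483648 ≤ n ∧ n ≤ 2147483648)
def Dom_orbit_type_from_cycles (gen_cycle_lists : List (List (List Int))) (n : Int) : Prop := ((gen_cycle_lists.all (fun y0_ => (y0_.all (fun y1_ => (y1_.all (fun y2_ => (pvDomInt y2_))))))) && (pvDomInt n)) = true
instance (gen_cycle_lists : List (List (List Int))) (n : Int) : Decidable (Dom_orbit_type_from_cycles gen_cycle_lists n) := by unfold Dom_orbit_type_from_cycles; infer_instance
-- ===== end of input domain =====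

-- B replaces A's path-compressed union-find parent forest by a flat component-label
-- array that is fully relabelled at each merging edge, and counts labels directly
-- (objective: alternative — a structurally different algorithm of similar size).

-- ===== PORT A =====
-- the inner 'find' while-loop of A (fuel only guards the recursion; it is never
-- exhausted on inputs admitted by Pre_, where the parent array is a forest)
def pvFindLoop (fuel : Nat) (parent : List Int) (x : Int) : Option (List Int × Int) :=
  match fuel with
  | 0 => none
  | fuel + 1 =>
    match PySem.List.pyGet? parent x with
    | none => none
    | some px =>
      if px = x then some (parent, x)
      else
        match PySem.List.pyGet? parent px with
        | none => none
        | some ppx =>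
          match PySem.List.pySet? parent x ppx with
          | none => none
          | some parent1 =>
            match PySem.List.pyGet? parent1 x with
            | none => none
            | some x1 => pvFindLoop fuel parent1 x1

def pvFind (parent : List Int) (x : Int) : Option (List Int × Int) :=
  pvFindLoop (parent.length + 1) parent x

def pvUnion (parent : List Int) (a b : Int) : Option (List Int) :=
  match pvFind parent a with
  | none => none
  | some (p1, ra) =>
    match pvFind p1 b with
    | none => none
    | some (p2, rb) =>
      if ra ≠ rb then PySem.List.pySet? p2 rb ra else some p2

def pvUnionCycle (parent? : Option (List Int)) (cycle : List Int) : Option (List Int) :=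
  (PySem.List.pyRange 0 ((cycle.length : Int) - 1) 1).foldl
    (fun acc k =>
      match acc with
      | none => none
      | some p =>
        match PySem.List.pyGet? cycle k, PySem.List.pyGet? cycle (k + 1) with
        | some a, some b => pvUnion p a b
        | _, _ => none)
    parent?

def orbit_type_from_cycles (gen_cycle_lists : List (List (List Int))) (n : Int) : List Int :=
  let parent0 := PySem.List.pyRange 0 (n + 1) 1
  let parentE := gen_cycle_lists.foldl
    (fun acc cycles => cycles.foldl pvUnionCycle acc) (some parent0)
  let st := (PySem.List.pyRange 1 (n + 1) 1).foldl
    (fun st i =>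
      match st with
      | none => none
      | some (p, d) =>
        match pvFind p i with
        | none => none
        | some (p1, r) => some (p1, d.insert r (d.getD r 0 + 1)))
    (parentE.map (fun p => (p, (PySem.Dict.empty : PySem.Dict Int Int))))
  match st with
  | none => []
  | some (_, d) => PySem.List.sorted d.values (fun v => v) true

-- ===== PORT B =====
def pvRelabel (comp? : Option (List Int)) (ab : Int × Int) : Option (List Int) :=
  match comp? with
  | none => none
  | some comp =>
    match PySem.List.pyGet? comp ab.1, PySem.List.pyGet? comp ab.2 with
    | some ca, some cb =>
      some (if ca ≠ cb then comp.map (fun c => if c = cb then ca else c) else comp)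
    | _, _ => none

def orbit_type_from_cycles_alt (gen_cycle_lists : List (List (List Int))) (n : Int) : List Int :=
  let comp0 := PySem.List.pyRange 0 (n + 1) 1
  let compE := gen_cycle_lists.foldl
    (fun acc cycles =>
      cycles.foldl (fun acc2 cycle => (cycle.zip (cycle.drop 1)).foldl pvRelabel acc2) acc)
    (some comp0)
  let st := (PySem.List.pyRange 1 (n + 1) 1).foldl
    (fun st i =>
      match st with
      | none => none
      | some (comp, d) =>
        match PySem.List.pyGet? comp i with
        | none => none
        | some c => some (comp, d.insert c (d.getD c 0 + 1)))
    (compE.map (fun c => (c, (PySem.Dict.empty : PySem.Dict Int Int))))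
  match st with
  | none => []
  | some (_, d) => PySem.List.sorted d.values (fun v => v) true

-- ===== PRECONDITION & SPEC =====
-- Pre_ excludes exactly the inputs where A raises IndexError: a cycle of length ≥ 2
-- containing a value outside the valid Python index range [-(n+1), n] of the
-- length-(n+1) parent list (negative in-range values are fine: both programs alias
-- them Python-style and agree).
def Pre_orbit_type_from_cycles (gen_cycle_lists : List (List (List Int))) (n : Int) : Prop :=
  ∀ cycles ∈ gen_cycle_lists, ∀ cycle ∈ cycles, 1 < cycle.length →
    ∀ x ∈ cycle, -(n + 1) ≤ x ∧ x ≤ n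
instance (gen_cycle_lists : List (List (List Int))) (n : Int) : Decidable (Pre_orbit_type_from_cycles gen_cycle_lists n) := by unfold Pre_orbit_type_from_cycles; infer_instance

def pvWitness_orbit_type_from_cycles : List (List (List Int)) × Int := ([[[1, 2], [3]], [[2, 4]]], 5)

def Spec_orbit_type_from_cycles (gen_cycle_lists : List (List (List Int))) (n : Int) (out : List Int) : Prop := out = orbit_type_from_cycles_alt gen_cycle_lists n
instance (gen_cycle_lists : List (List (List Int))) (n : Int) (out : List Int) : Decidable (Spec_orbit_type_from_cycles gen_cycle_lists n out) := by unfold Spec_orbit_type_from_cycles; infer_instance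

-- ===== CLAIM (what is proved, stated in full; the proofs are below) =====
def Claim_equal_orbit_type_from_cycles : Prop := ∀ (gen_cycle_lists : List (List (List Int))) (n : Int), Dom_orbit_type_from_cycles gen_cycle_lists n → Pre_orbit_type_from_cycles gen_cycle_lists n → Spec_orbit_type_from_cycles gen_cycle_lists n (orbit_type_from_cycles gen_cycle_lists n)

-- ===== LEMMAS AND PROOFS =====

-- ---------- proof-side machinery: the parent forest ----------
def pvStep (p : List Int) (i : Nat) : Nat := (p.getD i 0).toNat
def pvGoodP (p : List Int) : Prop := ∀ i, i < p.length → 0 ≤ p.getD i 0 ∧ (p.getD i 0).toNat < p.length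
def pvIsRoot (p : List Int) (i r : Nat) : Prop := (∃ k, (pvStep p)^[k] i = r) ∧ pvStep p r = r
def pvTotal (p : List Int) : Prop := ∀ i, i < p.length → ∃ r, pvIsRoot p i r
def pvSame (p : List Int) (i j : Nat) : Prop := ∃ r, pvIsRoot p i r ∧ pvIsRoot p j r
def pvNorm (len : Nat) (x : Int) : Nat := if 0 ≤ x then x.toNat else len - (-x).toNat
def pvKER (p comp : List Int) : Prop :=
  comp.length = p.length ∧ ∀ i j, i < p.length → j < p.length →
    (pvSame p i j ↔ comp.getD i 0 = comp.getD j 0)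

lemma pvIsRoot_unique {p : List Int} {i r1 r2 : Nat}
    (h1 : pvIsRoot p i r1) (h2 : pvIsRoot p i r2) : r1 = r2 := by
  obtain ⟨⟨k1, e1⟩, f1⟩ := h1
  obtain ⟨⟨k2, e2⟩, f2⟩ := h2
  rcases le_total k1 k2 with h | h
  · have e : (pvStep p)^[k2] i = r1 := by
      have hk : k2 = (k2 - k1) + k1 := by omega
      rw [hk, Function.iterate_add_apply, e1, Function.iterate_fixed f1]
    rw [← e, e2]
  · have e : (pvStep p)^[k1] i = r2 := by
      have hk : k1 = (k1 - k2) + k2 := by omega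
      rw [hk, Function.iterate_add_apply, e2, Function.iterate_fixed f2]
    rw [← e, e1]

lemma pvStep_lt {p : List Int} (hG : pvGoodP p) {i : Nat} (hi : i < p.length) :
    pvStep p i < p.length := (hG i hi).2

lemma pvIter_lt {p : List Int} (hG : pvGoodP p) {i : Nat} (hi : i < p.length) (k : Nat) :
    (pvStep p)^[k] i < p.length := by
  induction k with
  | zero => simpa using hi
  | succ k ih => rw [Function.iterate_succ_apply']; exact pvStep_lt hG ih

lemma pvRoot_lt {p : List Int} (hG : pvGoodP p) {i r : Nat} (hi : i < p.length)
    (h : pvIsRoot p i r) : r < p.length := by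
  obtain ⟨⟨k, e⟩, _⟩ := h
  rw [← e]; exact pvIter_lt hG hi k

lemma pvSame_root_eq {p : List Int} {i j ri rj : Nat}
    (h : pvSame p i j) (h1 : pvIsRoot p i ri) (h2 : pvIsRoot p j rj) : ri = rj := by
  obtain ⟨r, hi, hj⟩ := h
  rw [pvIsRoot_unique h1 hi, pvIsRoot_unique h2 hj]

-- a node reaches its root in fewer than p.length steps (pigeonhole on the path)
lemma pvReach_bound {p : List Int} {i r : Nat} (hG : pvGoodP p) (hi : i < p.length)
    (h : pvIsRoot p i r) : ∃ k, k + 1 ≤ p.length ∧ (pvStep p)^[k] i = r := by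
  classical
  obtain ⟨⟨k0, e0⟩, fr⟩ := h
  have hex : ∃ k, pvStep p ((pvStep p)^[k] i) = (pvStep p)^[k] i := ⟨k0, by rw [e0]; exact fr⟩
  set K := Nat.find hex with hKdef
  have hK : pvStep p ((pvStep p)^[K] i) = (pvStep p)^[K] i := Nat.find_spec hex
  have heq : (pvStep p)^[K] i = r :=
    pvIsRoot_unique ⟨⟨K, rfl⟩, hK⟩ ⟨⟨k0, e0⟩, fr⟩
  refine ⟨K, ?_, heq⟩
  by_contra hbig
  push_neg at hbig
  have key : ∀ a b : Nat, a < b → b ≤ K → (pvStep p)^[a] i ≠ (pvStep p)^[b] i := by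
    intro a b hlt hbK hv
    have hsm : (pvStep p)^[a + (K - b)] i = (pvStep p)^[K] i := by
      have h1 : (pvStep p)^[K] i = (pvStep p)^[K - b] ((pvStep p)^[b] i) := by
        rw [← Function.iterate_add_apply]; congr 1; omega
      have h2 : (pvStep p)^[a + (K - b)] i = (pvStep p)^[K - b] ((pvStep p)^[a] i) := by
        rw [add_comm, Function.iterate_add_apply]
      rw [h2, hv, ← h1]
    have hfix : pvStep p ((pvStep p)^[a + (K - b)] i) = (pvStep p)^[a + (K - b)] i := by
      rw [hsm]; exact hK
    exact Nat.find_min hex (by omega) hfix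
  have hinj : Function.Injective
      (fun j : Fin (K + 1) => (⟨(pvStep p)^[(j : Nat)] i, pvIter_lt hG hi j⟩ : Fin p.length)) := by
    intro a b hab
    have hv : (pvStep p)^[(a : Nat)] i = (pvStep p)^[(b : Nat)] i := congrArg Fin.val hab
    rcases lt_trichotomy (a : Nat) (b : Nat) with h | h | h
    · exact absurd hv (key _ _ h (by omega))
    · exact Fin.ext h
    · exact absurd hv.symm (key _ _ h (by omega))
  have hcard := Fintype.card_le_of_injective _ hinj
  simp only [Fintype.card_fin] at hcard
  omega

-- ---------- bridges between Python indexing and the Nat-normalised index ----------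
lemma pvNorm_lt {len : Nat} {x : Int} (h : PySem.Raise.InRange len x) :
    pvNorm len x < len := by
  obtain ⟨h1, h2⟩ := h
  unfold pvNorm
  split
  · omega
  · omega

lemma pvIdx_norm {len : Nat} {x : Int} (h : PySem.Raise.InRange len x) :
    PySem.List.pyIdx? len x = some (pvNorm len x) := by
  obtain ⟨h1, h2⟩ := h
  unfold PySem.List.pyIdx? pvNorm
  by_cases h0 : 0 ≤ x
  · simp [h0, h2]
  · simp [h0, h1]

lemma pvGet_norm {p : List Int} {x : Int} (h : PySem.Raise.InRange p.length x) :
    PySem.List.pyGet? p x = some (p.getD (pvNorm p.length x) 0) := by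
  unfold PySem.List.pyGet?
  rw [pvIdx_norm h]
  have hlt := pvNorm_lt h
  simp [List.getElem?_eq_getElem hlt, List.getD_eq_getElem?_getD, List.getElem?_eq_getElem hlt]

lemma pvSet_norm {p : List Int} {x v : Int} (h : PySem.Raise.InRange p.length x) :
    PySem.List.pySet? p x v = some (p.set (pvNorm p.length x) v) := by
  unfold PySem.List.pySet?
  rw [pvIdx_norm h]
  rfl

lemma pvInRange_of_nonneg {len : Nat} {x : Int} (h0 : 0 ≤ x) (h1 : x < (len : Int)) :
    PySem.Raise.InRange len x := ⟨by omega, h1⟩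

lemma pvNorm_nonneg {len : Nat} {x : Int} (h0 : 0 ≤ x) : pvNorm len x = x.toNat := by
  unfold pvNorm; rw [if_pos h0]

lemma pvNorm_natCast (len : Nat) (m : Nat) : pvNorm len (m : Int) = m := by
  unfold pvNorm; simp

-- getD after set
lemma pvGetD_set_self {p : List Int} {j : Nat} (hj : j < p.length) (v : Int) :
    (p.set j v).getD j 0 = v := by
  rw [List.getD_eq_getElem?_getD, List.getElem?_set_self hj]; rfl

lemma pvGetD_set_ne {p : List Int} {j i : Nat} (h : i ≠ j) (v : Int) :
    (p.set j v).getD i 0 = p.getD i 0 := by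
  rw [List.getD_eq_getElem?_getD, List.getElem?_set_ne (Ne.symm h), ← List.getD_eq_getElem?_getD]

lemma pvStep_set_self {p : List Int} {j m : Nat} (hj : j < p.length) :
    pvStep (p.set j ((m : Nat) : Int)) j = m := by
  unfold pvStep; rw [pvGetD_set_self hj]; simp

lemma pvStep_set_ne {p : List Int} {j i : Nat} (h : i ≠ j) (v : Int) :
    pvStep (p.set j v) i = pvStep p i := by
  unfold pvStep; rw [pvGetD_set_ne h]

lemma pvGoodP_set {p : List Int} {j m : Nat} (hG : pvGoodP p) (hm : m < p.length) :
    pvGoodP (p.set j ((m : Nat) : Int)) := by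
  intro i hi
  rw [List.length_set] at hi ⊢
  by_cases hij : i = j
  · subst hij
    rw [pvGetD_set_self hi]
    constructor
    · exact Int.natCast_nonneg m
    · simpa using hm
  · rw [pvGetD_set_ne hij]
    exact hG i hi

-- ---------- path compression preserves roots ----------
lemma pvFix_ne_j {p : List Int} {j r : Nat} (hnf : pvStep p j ≠ j)
    (hf : pvStep p r = r) : r ≠ j := by
  intro h; exact hnf (h ▸ hf)

lemma pvCompress_fix {p : List Int} {j r : Nat} (hnf : pvStep p j ≠ j) (v : Int)
    (hf : pvStep p r = r) : pvStep (p.set j v) r = r := by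
  rw [pvStep_set_ne (pvFix_ne_j hnf hf)]; exact hf

lemma pvCompress_path {p : List Int} {j : Nat} (hG : pvGoodP p) (hj : j < p.length)
    (hnf : pvStep p j ≠ j) :
    ∀ k i r, (pvStep p)^[k] i = r → pvStep p r = r →
      ∃ k' ≤ k, (pvStep (p.set j ((pvStep p (pvStep p j) : Nat) : Int)))^[k'] i = r := by
  intro k
  induction k using Nat.strong_induction_on with
  | _ k ih =>
    intro i r e hf
    by_cases hfi : pvStep p i = i
    · have hri : r = i := by rw [← e, Function.iterate_fixed hfi]
      exact ⟨0, Nat.zero_le k, hri.symm⟩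
    · match k, e with
      | 0, e =>
        have hir : i = r := by simpa using e
        exact absurd (hir ▸ hf) hfi
      | (k'' + 1), e =>
        rw [Function.iterate_succ_apply] at e
        by_cases hij : i = j
        · subst hij
          match k'', e with
          | 0, e =>
            -- pvStep p j = r is already the root
            have e0 : pvStep p i = r := by simpa using e
            refine ⟨1, by omega, ?_⟩
            simp only [Function.iterate_succ_apply, Function.iterate_zero_apply]
            rw [pvStep_set_self hj, e0, hf]
          | (k3 + 1), e =>
            rw [Function.iterate_succ_apply] at e
            obtain ⟨k', hk', e'⟩ := ih k3 (by omega) _ _ e hf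
            refine ⟨k' + 1, by omega, ?_⟩
            rw [Function.iterate_succ_apply, pvStep_set_self hj]
            exact e'
        · obtain ⟨k', hk', e'⟩ := ih k'' (by omega) _ _ e hf
          refine ⟨k' + 1, by omega, ?_⟩
          rw [Function.iterate_succ_apply, pvStep_set_ne hij]
          exact e'

lemma pvCompress_all {p : List Int} {j : Nat} (hG : pvGoodP p) (hT : pvTotal p)
    (hj : j < p.length) (hnf : pvStep p j ≠ j) :
    (p.set j ((pvStep p (pvStep p j) : Nat) : Int)).length = p.length ∧
    pvGoodP (p.set j ((pvStep p (pvStep p j) : Nat) : Int)) ∧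
    pvTotal (p.set j ((pvStep p (pvStep p j) : Nat) : Int)) ∧
    (∀ i, i < p.length → ∀ r,
      (pvIsRoot p i r ↔ pvIsRoot (p.set j ((pvStep p (pvStep p j) : Nat) : Int)) i r)) := by
  have hlen : (p.set j ((pvStep p (pvStep p j) : Nat) : Int)).length = p.length :=
    List.length_set ..
  have hGood : pvGoodP (p.set j ((pvStep p (pvStep p j) : Nat) : Int)) :=
    pvGoodP_set hG (pvStep_lt hG (pvStep_lt hG hj))
  have hfwd : ∀ i r, pvIsRoot p i r →
      pvIsRoot (p.set j ((pvStep p (pvStep p j) : Nat) : Int)) i r := by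
    rintro i r ⟨⟨k, e⟩, hf⟩
    obtain ⟨k', _, e'⟩ := pvCompress_path hG hj hnf k i r e hf
    exact ⟨⟨k', e'⟩, pvCompress_fix hnf _ hf⟩
  have hTot : pvTotal (p.set j ((pvStep p (pvStep p j) : Nat) : Int)) := by
    intro i hi
    rw [hlen] at hi
    obtain ⟨r, hr⟩ := hT i hi
    exact ⟨r, hfwd i r hr⟩
  refine ⟨hlen, hGood, hTot, fun i hi r => ⟨hfwd i r, fun h' => ?_⟩⟩
  obtain ⟨r0, hr0⟩ := hT i hi
  rw [pvIsRoot_unique h' (hfwd i r0 hr0)]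
  exact hr0

-- ---------- specification of A's find loop ----------
lemma pvFindLoop_spec :
    ∀ (fuel : Nat) (p : List Int) (x : Int) (k r : Nat),
    pvGoodP p → pvTotal p → PySem.Raise.InRange p.length x →
    (pvStep p)^[k] (pvNorm p.length x) = r → pvStep p r = r →
    k + 1 ≤ fuel → (x < 0 → k + 2 ≤ fuel) →
    ∃ p', pvFindLoop fuel p x = some (p', ((r : Nat) : Int)) ∧
      p'.length = p.length ∧ pvGoodP p' ∧ pvTotal p' ∧
      (∀ i, i < p.length → ∀ r', (pvIsRoot p i r' ↔ pvIsRoot p' i r')) := by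
  intro fuel
  induction fuel with
  | zero => intro p x k r _ _ _ _ _ hf1 _; omega
  | succ fuel ih =>
    intro p x k r hG hT hx e hf hf1 hf2
    have hj : pvNorm p.length x < p.length := pvNorm_lt hx
    have hget := pvGet_norm hx
    have hpx0 : 0 ≤ p.getD (pvNorm p.length x) 0 := (hG _ hj).1
    have hpxlt : (p.getD (pvNorm p.length x) 0).toNat < p.length := (hG _ hj).2
    by_cases hpe : p.getD (pvNorm p.length x) 0 = x
    · -- parent[x] == x : return x
      have hx0 : 0 ≤ x := hpe ▸ hpx0
      have hjx : pvNorm p.length x = x.toNat := pvNorm_nonneg hx0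
      have hfix : pvStep p (pvNorm p.length x) = pvNorm p.length x := by
        unfold pvStep; rw [hpe, hjx]
      have hrj : r = pvNorm p.length x := by rw [← e, Function.iterate_fixed hfix]
      refine ⟨p, ?_, rfl, hG, hT, fun i _ r' => Iff.rfl⟩
      have hcast : ((r : Nat) : Int) = x := by rw [hrj, hjx]; omega
      simp only [pvFindLoop, hget, hpe, if_pos, hcast]
    · -- loop body
      have hpxIR : PySem.Raise.InRange p.length (p.getD (pvNorm p.length x) 0) :=
        pvInRange_of_nonneg hpx0 (by omega)
      have hget2 := pvGet_norm hpxIR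
      rw [pvNorm_nonneg hpx0] at hget2
      have hppx0 : 0 ≤ p.getD (p.getD (pvNorm p.length x) 0).toNat 0 := (hG _ hpxlt).1
      have hppxlt : (p.getD (p.getD (pvNorm p.length x) 0).toNat 0).toNat < p.length :=
        (hG _ hpxlt).2
      have hset := pvSet_norm (v := p.getD (p.getD (pvNorm p.length x) 0).toNat 0) hx
      have hxIR' : PySem.Raise.InRange
          (p.set (pvNorm p.length x) (p.getD (p.getD (pvNorm p.length x) 0).toNat 0)).length x := by
        rw [List.length_set]; exact hx
      have hget3 := pvGet_norm hxIR'
      rw [show pvNorm (p.set (pvNorm p.length x)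
            (p.getD (p.getD (pvNorm p.length x) 0).toNat 0)).length x = pvNorm p.length x
          from by rw [List.length_set], pvGetD_set_self hj] at hget3
      by_cases hfixj : pvStep p (pvNorm p.length x) = pvNorm p.length x
      · -- the written value equals the old one (possible only for x < 0): a no-op write
        have hx0 : x < 0 := by
          by_contra h
          push_neg at h
          apply hpe
          have h1 : (p.getD (pvNorm p.length x) 0).toNat = pvNorm p.length x := hfixj
          have h2 : pvNorm p.length x = x.toNat := pvNorm_nonneg h
          omega
        have hpxj : p.getD (pvNorm p.length x) 0 = ((pvNorm p.length x : Nat) : Int) := by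
          have h1 : (p.getD (pvNorm p.length x) 0).toNat = pvNorm p.length x := hfixj
          omega
        have hppxe : p.getD (p.getD (pvNorm p.length x) 0).toNat 0 = p.getD (pvNorm p.length x) 0 := by
          rw [show (p.getD (pvNorm p.length x) 0).toNat = pvNorm p.length x from hfixj]
        have hsetid : p.set (pvNorm p.length x) (p.getD (p.getD (pvNorm p.length x) 0).toNat 0) = p := by
          apply List.ext_getElem?
          intro m
          by_cases hm : m = pvNorm p.length x
          · subst hm
            rw [List.getElem?_set_self hj, hppxe, List.getElem?_eq_getElem hj]
            have hg : p.getD (pvNorm p.length x) 0 = p[pvNorm p.length x] := by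
              rw [List.getD_eq_getElem?_getD, List.getElem?_eq_getElem hj]; rfl
            rw [← hg]
          · rw [List.getElem?_set_ne (Ne.symm hm)]
        have hrj : r = pvNorm p.length x := by rw [← e, Function.iterate_fixed hfixj]
        obtain ⟨p', hrun, hl, hG', hT', hiff⟩ := ih p ((pvNorm p.length x : Nat) : Int) 0 r hG hT
          (pvInRange_of_nonneg (by omega) (by omega))
          (by rw [pvNorm_natCast]; simpa using hrj.symm)
          (by rw [hrj]; exact hfixj)
          (by have := hf2 hx0; omega)
          (by intro hc; omega)
        refine ⟨p', ?_, hl, hG', hT', hiff⟩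
        simp only [pvFindLoop, hget, if_neg hpe, hget2, hset, hget3]
        rw [hsetid, hppxe, hpxj]
        exact hrun
      · -- genuine compression step
        have hk1 : 1 ≤ k := by
          rcases Nat.eq_zero_or_pos k with h0 | h
          · subst h0
            have : pvNorm p.length x = r := by simpa using e
            exact absurd (this ▸ hf) hfixj
          · exact h
        have hsppx : pvStep p (pvStep p (pvNorm p.length x))
            = (p.getD (p.getD (pvNorm p.length x) 0).toNat 0).toNat := rfl
        have hcast : (((p.getD (p.getD (pvNorm p.length x) 0).toNat 0).toNat : Nat) : Int)
            = p.getD (p.getD (pvNorm p.length x) 0).toNat 0 := by omega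
        have hpath2 : ∃ k2 ≤ k - 1, (pvStep p)^[k2] ((p.getD (p.getD (pvNorm p.length x) 0).toNat 0).toNat) = r := by
          match k, hk1, e with
          | (k'' + 1), _, e =>
            rw [Function.iterate_succ_apply] at e
            match k'', e with
            | 0, e =>
              have e0 : pvStep p (pvNorm p.length x) = r := by simpa using e
              refine ⟨0, by omega, ?_⟩
              simp only [Function.iterate_zero_apply]
              rw [← hsppx, e0, hf]
            | (k3 + 1), e =>
              rw [Function.iterate_succ_apply] at e
              refine ⟨k3, by omega, ?_⟩
              rw [← hsppx]; exact e
        obtain ⟨k2, hk2, e2⟩ := hpath2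
        obtain ⟨k3, hk3, e3⟩ := pvCompress_path hG hj hfixj k2 _ r e2 hf
        obtain ⟨hlenc, hGc, hTc, hiffc⟩ := pvCompress_all hG hT hj hfixj
        obtain ⟨p', hrun, hl, hG', hT', hiff⟩ := ih
          (p.set (pvNorm p.length x) ((pvStep p (pvStep p (pvNorm p.length x)) : Nat) : Int))
          (p.getD (p.getD (pvNorm p.length x) 0).toNat 0) k3 r hGc hTc
          (by rw [hlenc]; exact pvInRange_of_nonneg hppx0 (by omega))
          (by rw [hlenc, pvNorm_nonneg hppx0]; exact e3)
          (pvCompress_fix hfixj _ hf)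
          (by omega)
          (by intro hc; omega)
        refine ⟨p', ?_, by rw [hl, hlenc], hG', hT', fun i hi r' =>
          (hiffc i hi r').trans (hiff i (by rw [hlenc]; exact hi) r')⟩
        simp only [pvFindLoop, hget, if_neg hpe, hget2, hset, hget3]
        rw [show p.set (pvNorm p.length x) (p.getD (p.getD (pvNorm p.length x) 0).toNat 0)
            = p.set (pvNorm p.length x) ((pvStep p (pvStep p (pvNorm p.length x)) : Nat) : Int)
          from by rw [hsppx, hcast]]
        exact hrun

lemma pvFind_spec {p : List Int} {x : Int} (hG : pvGoodP p) (hT : pvTotal p)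
    (hx : PySem.Raise.InRange p.length x) :
    ∃ p' r, pvFind p x = some (p', ((r : Nat) : Int)) ∧
      pvIsRoot p (pvNorm p.length x) r ∧
      p'.length = p.length ∧ pvGoodP p' ∧ pvTotal p' ∧
      (∀ i, i < p.length → ∀ r', (pvIsRoot p i r' ↔ pvIsRoot p' i r')) := by
  have hj : pvNorm p.length x < p.length := pvNorm_lt hx
  obtain ⟨r, hr⟩ := hT _ hj
  obtain ⟨k, hk, e⟩ := pvReach_bound hG hj hr
  obtain ⟨p', hrun, hl, hG', hT', hiff⟩ :=
    pvFindLoop_spec (p.length + 1) p x k r hG hT hx e hr.2 (by omega) (fun _ => by omega)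
  exact ⟨p', r, hrun, hr, hl, hG', hT', hiff⟩

-- ---------- linking two roots ----------
lemma pvLink_avoid {p : List Int} {rb : Nat} (frb : pvStep p rb = rb) (v : Int) :
    ∀ k i rr, (pvStep p)^[k] i = rr → rr ≠ rb → (pvStep (p.set rb v))^[k] i = rr := by
  intro k
  induction k with
  | zero => intro i rr e _; exact e
  | succ k ihk =>
    intro i rr e hne
    rw [Function.iterate_succ_apply] at e
    have hib : i ≠ rb := by
      intro h
      subst h
      rw [frb] at e
      exact hne (by rw [← e, Function.iterate_fixed frb])
    rw [Function.iterate_succ_apply, pvStep_set_ne hib]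
    exact ihk _ _ e hne

lemma pvLink_to {p : List Int} {ra rb : Nat} (hrb : rb < p.length)
    (fra : pvStep p ra = ra) (frb : pvStep p rb = rb) (hne : ra ≠ rb) :
    ∀ k i, (pvStep p)^[k] i = rb → ∃ m, (pvStep (p.set rb ((ra : Nat) : Int)))^[m] i = ra := by
  intro k
  induction k with
  | zero =>
    intro i e
    subst e
    refine ⟨1, ?_⟩
    simp only [Function.iterate_succ_apply, Function.iterate_zero_apply]
    exact pvStep_set_self hrb
  | succ k ihk =>
    intro i e
    by_cases hib : i = rb
    · subst hib
      refine ⟨1, ?_⟩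
      simp only [Function.iterate_succ_apply, Function.iterate_zero_apply]
      exact pvStep_set_self hrb
    · rw [Function.iterate_succ_apply] at e
      obtain ⟨m, hm⟩ := ihk _ e
      refine ⟨m + 1, ?_⟩
      rw [Function.iterate_succ_apply, pvStep_set_ne hib]
      exact hm

lemma pvLink_root {p : List Int} {ra rb : Nat} (hrb : rb < p.length)
    (fra : pvStep p ra = ra) (frb : pvStep p rb = rb) (hne : ra ≠ rb) :
    ∀ i rr, pvIsRoot p i rr → pvIsRoot (p.set rb ((ra : Nat) : Int)) i (if rr = rb then ra else rr) := by
  rintro i rr ⟨⟨k, e⟩, hfr⟩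
  by_cases hrr : rr = rb
  · subst hrr
    rw [if_pos rfl]
    obtain ⟨m, hm⟩ := pvLink_to hrb fra frb hne k i e
    refine ⟨⟨m, hm⟩, ?_⟩
    rw [pvStep_set_ne hne]
    exact fra
  · rw [if_neg hrr]
    refine ⟨⟨k, pvLink_avoid frb _ k i rr e hrr⟩, ?_⟩
    rw [pvStep_set_ne hrr]
    exact hfr

lemma pvLink_all {p : List Int} {ra rb : Nat} (hG : pvGoodP p) (hT : pvTotal p)
    (hra : ra < p.length) (hrb : rb < p.length)
    (fra : pvStep p ra = ra) (frb : pvStep p rb = rb) (hne : ra ≠ rb) :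
    (p.set rb ((ra : Nat) : Int)).length = p.length ∧
    pvGoodP (p.set rb ((ra : Nat) : Int)) ∧
    pvTotal (p.set rb ((ra : Nat) : Int)) ∧
    (∀ i j, i < p.length → j < p.length →
      (pvSame (p.set rb ((ra : Nat) : Int)) i j ↔
        (pvSame p i j ∨ (pvIsRoot p i ra ∧ pvIsRoot p j rb) ∨ (pvIsRoot p i rb ∧ pvIsRoot p j ra)))) := by
  have hlen : (p.set rb ((ra : Nat) : Int)).length = p.length := List.length_set ..
  have hGood : pvGoodP (p.set rb ((ra : Nat) : Int)) := pvGoodP_set hG hra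
  have hTot : pvTotal (p.set rb ((ra : Nat) : Int)) := by
    intro i hi
    rw [hlen] at hi
    obtain ⟨r, hr⟩ := hT i hi
    exact ⟨_, pvLink_root hrb fra frb hne i r hr⟩
  refine ⟨hlen, hGood, hTot, fun i j hi hj => ?_⟩
  obtain ⟨u, hu⟩ := hT i hi
  obtain ⟨v, hv⟩ := hT j hj
  have hu' := pvLink_root hrb fra frb hne i u hu
  have hv' := pvLink_root hrb fra frb hne j v hv
  constructor
  · intro hs
    have heq := pvSame_root_eq hs hu' hv'
    by_cases h1 : u = rb <;> by_cases h2 : v = rb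
    · exact Or.inl ⟨u, hu, by rw [h1, ← h2]; exact hv⟩
    · rw [if_pos h1, if_neg h2] at heq
      exact Or.inr (Or.inr ⟨h1 ▸ hu, by rw [heq]; exact hv⟩)
    · rw [if_neg h1, if_pos h2] at heq
      exact Or.inr (Or.inl ⟨by rw [← heq]; exact hu, h2 ▸ hv⟩)
    · rw [if_neg h1, if_neg h2] at heq
      exact Or.inl ⟨u, hu, by rw [heq]; exact hv⟩
  · intro hs
    rcases hs with hs | ⟨h1, h2⟩ | ⟨h1, h2⟩
    · have huv : u = v := pvSame_root_eq hs hu hv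
      refine ⟨_, hu', ?_⟩
      rw [huv]
      exact hv'
    · have hu1 : u = ra := pvIsRoot_unique hu h1
      have hv1 : v = rb := pvIsRoot_unique hv h2
      refine ⟨ra, ?_, ?_⟩
      · simpa [hu1, hne] using hu'
      · simpa [hv1] using hv'
    · have hu1 : u = rb := pvIsRoot_unique hu h1
      have hv1 : v = ra := pvIsRoot_unique hv h2
      refine ⟨ra, ?_, ?_⟩
      · simpa [hu1] using hu'
      · simpa [hv1, hne] using hv'

-- ---------- one edge: A's union versus B's relabel ----------
lemma pvGetD_map {comp : List Int} {f : Int → Int} {i : Nat} (hi : i < comp.length) :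
    (comp.map f).getD i 0 = f (comp.getD i 0) := by
  rw [List.getD_eq_getElem?_getD, List.getElem?_map, List.getElem?_eq_getElem hi,
    List.getD_eq_getElem?_getD, List.getElem?_eq_getElem hi]
  rfl

lemma pvSame_iff_of_iff {p q : List Int} (hpl : q.length = p.length)
    (hiff : ∀ i, i < p.length → ∀ r', (pvIsRoot p i r' ↔ pvIsRoot q i r'))
    {i j : Nat} (hi : i < p.length) (hj : j < p.length) :
    pvSame p i j ↔ pvSame q i j := by
  constructor
  · rintro ⟨r, h1, h2⟩; exact ⟨r, (hiff i hi r).mp h1, (hiff j hj r).mp h2⟩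
  · rintro ⟨r, h1, h2⟩; exact ⟨r, (hiff i hi r).mpr h1, (hiff j hj r).mpr h2⟩

lemma pvUnion_spec {p comp : List Int} {a b : Int} (hG : pvGoodP p) (hT : pvTotal p)
    (hker : pvKER p comp) (ha : PySem.Raise.InRange p.length a) (hb : PySem.Raise.InRange p.length b) :
    ∃ p' comp', pvUnion p a b = some p' ∧ pvRelabel (some comp) (a, b) = some comp' ∧
      p'.length = p.length ∧ pvGoodP p' ∧ pvTotal p' ∧ pvKER p' comp' := by
  obtain ⟨hcl, hkr⟩ := hker
  have hna : pvNorm p.length a < p.length := pvNorm_lt ha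
  have hnb : pvNorm p.length b < p.length := pvNorm_lt hb
  obtain ⟨p1, ra, hrun1, hroota, hl1, hG1, hT1, hiff1⟩ := pvFind_spec hG hT ha
  obtain ⟨p2, rb, hrun2, hrootb1, hl2, hG2, hT2, hiff2⟩ :=
    pvFind_spec hG1 hT1 (show PySem.Raise.InRange p1.length b from hl1 ▸ hb)
  have hrootb : pvIsRoot p (pvNorm p.length b) rb := by
    rw [show pvNorm p1.length b = pvNorm p.length b from by rw [hl1]] at hrootb1
    exact (hiff1 _ hnb rb).mpr hrootb1
  have hiff12 : ∀ i, i < p.length → ∀ r', (pvIsRoot p i r' ↔ pvIsRoot p2 i r') :=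
    fun i hi r' => (hiff1 i hi r').trans (hiff2 i (by rw [hl1]; exact hi) r')
  have hlen2 : p2.length = p.length := hl2.trans hl1
  have hra2 : pvIsRoot p2 (pvNorm p.length a) ra := (hiff12 _ hna ra).mp hroota
  have hrb2 : pvIsRoot p2 (pvNorm p.length b) rb := (hiff12 _ hnb rb).mp hrootb
  have hralt : ra < p.length := pvRoot_lt hG hna hroota
  have hrblt : rb < p.length := pvRoot_lt hG hnb hrootb
  have hgca : PySem.List.pyGet? comp a = some (comp.getD (pvNorm p.length a) 0) := by
    have := pvGet_norm (p := comp) (x := a) (by rw [hcl]; exact ha)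
    rwa [show pvNorm comp.length a = pvNorm p.length a from by rw [hcl]] at this
  have hgcb : PySem.List.pyGet? comp b = some (comp.getD (pvNorm p.length b) 0) := by
    have := pvGet_norm (p := comp) (x := b) (by rw [hcl]; exact hb)
    rwa [show pvNorm comp.length b = pvNorm p.length b from by rw [hcl]] at this
  have hiffc : ra = rb ↔ comp.getD (pvNorm p.length a) 0 = comp.getD (pvNorm p.length b) 0 := by
    rw [← hkr _ _ hna hnb]
    constructor
    · intro h; exact ⟨ra, hroota, by rw [h]; exact hrootb⟩
    · intro hs; exact pvSame_root_eq hs hroota hrootb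
  by_cases heq : ra = rb
  · refine ⟨p2, comp, ?_, ?_, hlen2, hG2, hT2, hcl.trans hlen2.symm, ?_⟩
    · simp only [pvUnion, hrun1, hrun2]
      rw [if_neg (by simpa using heq)]
    · simp only [pvRelabel, hgca, hgcb]
      rw [if_neg (by simpa using hiffc.mp heq)]
    · intro i j hi hj
      rw [hlen2] at hi hj
      rw [← pvSame_iff_of_iff hlen2 hiff12 hi hj]
      exact hkr i j hi hj
  · obtain ⟨hlen3, hG3, hT3, hchar⟩ :=
      pvLink_all hG2 hT2 (hlen2 ▸ hralt) (hlen2 ▸ hrblt) hra2.2 hrb2.2 heq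
    have hcane : ¬ comp.getD (pvNorm p.length a) 0 = comp.getD (pvNorm p.length b) 0 :=
      fun h => heq (hiffc.mpr h)
    refine ⟨p2.set rb ((ra : Nat) : Int),
      comp.map (fun c => if c = comp.getD (pvNorm p.length b) 0 then comp.getD (pvNorm p.length a) 0 else c),
      ?_, ?_, hlen3.trans hlen2, hG3, hT3, ?_⟩
    · simp only [pvUnion, hrun1, hrun2]
      rw [if_pos (by simpa using heq)]
      have hIR : PySem.Raise.InRange p2.length ((rb : Nat) : Int) :=
        pvInRange_of_nonneg (by omega) (by rw [hlen2]; exact_mod_cast hrblt)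
      rw [pvSet_norm hIR, pvNorm_natCast]
    · simp only [pvRelabel, hgca, hgcb]
      rw [if_pos (by simpa using hcane)]
    · constructor
      · rw [List.length_map, hcl, hlen3, hlen2]
      · intro i j hi hj
        rw [hlen3.trans hlen2] at hi hj
        have hchar' := hchar i j (hlen2 ▸ hi) (hlen2 ▸ hj)
        rw [hchar']
        have hIRa : ∀ m, m < p.length → (pvIsRoot p2 m ra ↔ comp.getD m 0 = comp.getD (pvNorm p.length a) 0) := by
          intro m hm
          rw [← hkr _ _ hm hna]
          constructor
          · intro h; exact ⟨ra, (hiff12 _ hm ra).mpr h, hroota⟩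
          · intro hs
            obtain ⟨w, hw1, hw2⟩ := hs
            rw [pvIsRoot_unique hroota hw2]
            exact (hiff12 _ hm _).mp hw1
        have hIRb : ∀ m, m < p.length → (pvIsRoot p2 m rb ↔ comp.getD m 0 = comp.getD (pvNorm p.length b) 0) := by
          intro m hm
          rw [← hkr _ _ hm hnb]
          constructor
          · intro h; exact ⟨rb, (hiff12 _ hm rb).mpr h, hrootb⟩
          · intro hs
            obtain ⟨w, hw1, hw2⟩ := hs
            rw [pvIsRoot_unique hrootb hw2]
            exact (hiff12 _ hm _).mp hw1
        rw [pvGetD_map (by rw [hcl]; exact hi), pvGetD_map (by rw [hcl]; exact hj)]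
        rw [← pvSame_iff_of_iff hlen2 hiff12 hi hj, hkr i j hi hj, hIRa i hi, hIRa j hj, hIRb i hi, hIRb j hj]
        split_ifs with h1 h2 h2 <;> constructor <;> intro hx <;> omega

-- ---------- folding over the whole edge list ----------
def pvStepA (acc : Option (List Int)) (e : Int × Int) : Option (List Int) :=
  match acc with
  | none => none
  | some p => pvUnion p e.1 e.2

def pvEdgesOf (gcl : List (List (List Int))) : List (Int × Int) :=
  gcl.flatMap (fun cs => cs.flatMap (fun c => c.zip (c.drop 1)))

lemma pvEdges_fold :
    ∀ (es : List (Int × Int)) (p comp : List Int),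
    pvGoodP p → pvTotal p → pvKER p comp →
    (∀ e ∈ es, PySem.Raise.InRange p.length e.1 ∧ PySem.Raise.InRange p.length e.2) →
    ∃ p' comp', es.foldl pvStepA (some p) = some p' ∧
      es.foldl pvRelabel (some comp) = some comp' ∧
      p'.length = p.length ∧ pvGoodP p' ∧ pvTotal p' ∧ pvKER p' comp' := by
  intro es
  induction es with
  | nil =>
    intro p comp hG hT hker _
    exact ⟨p, comp, rfl, rfl, rfl, hG, hT, hker⟩
  | cons e es ihe =>
    intro p comp hG hT hker hmem
    obtain ⟨p1, comp1, hr1, hr2, hl1, hG1, hT1, hker1⟩ :=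
      pvUnion_spec hG hT hker (hmem e (by simp)).1 (hmem e (by simp)).2
    obtain ⟨p', comp', hq1, hq2, hl', hG', hT', hker'⟩ := ihe p1 comp1 hG1 hT1 hker1
      (fun e' he' => by rw [hl1]; exact hmem e' (by simp [he']))
    refine ⟨p', comp', ?_, ?_, hl'.trans hl1, hG', hT', hker'⟩
    · simpa only [List.foldl_cons, pvStepA, hr1] using hq1
    · have : pvRelabel (some comp) e = some comp1 := by
        obtain ⟨e1, e2⟩ := e
        exact hr2
      simpa only [List.foldl_cons, this] using hq2

-- ---------- A's index loop over a cycle is the fold over consecutive pairs ----------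
lemma pvZip_eq_map_range (c : List Int) :
    c.zip (c.drop 1) = (List.range (c.length - 1)).map
      (fun k => (c.getD k 0, c.getD (k + 1) 0)) := by
  apply List.ext_getElem
  · simp
  · intro m h1 h2
    simp only [List.length_zip, List.length_drop] at h1
    have hma : m < c.length := by omega
    have hmb : m + 1 < c.length := by omega
    simp only [List.getElem_zip, List.getElem_map, List.getElem_range, List.getElem_drop]
    rw [List.getD_eq_getElem _ _ hma, List.getD_eq_getElem _ _ hmb]
    simp [Nat.add_comm]

lemma pvUnionCycle_eq (acc : Option (List Int)) (c : List Int) :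
    pvUnionCycle acc c = (c.zip (c.drop 1)).foldl pvStepA acc := by
  rw [pvUnionCycle, PySem.List.pyRange_one, pvZip_eq_map_range, List.foldl_map, List.foldl_map]
  have hcount : ((c.length : Int) - 1 - 0).toNat = c.length - 1 := by omega
  rw [hcount]
  apply PySem.List.foldl_congr_mem
  intro acc' k hk
  have hklt : k < c.length - 1 := List.mem_range.mp hk
  have h1 : getElem? c k = some (c.getD k 0) := by
    rw [List.getElem?_eq_getElem (show k < c.length from by omega),
      List.getD_eq_getElem _ _ (show k < c.length from by omega)]
  have h2 : PySem.List.pyGet? c ((k : Nat) + 1) = some (c.getD (k + 1) 0) := by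
    rw [show ((k : Nat) : Int) + 1 = (((k + 1 : Nat)) : Int) from by push_cast; ring,
      PySem.List.pyGet?_natCast,
      List.getElem?_eq_getElem (show k + 1 < c.length from by omega),
      List.getD_eq_getElem _ _ (show k + 1 < c.length from by omega)]
  cases acc' with
  | none => simp only [pvStepA]
  | some p => simp only [pvStepA, zero_add, PySem.List.pyGet?_natCast, h1, h2]

lemma pvPortA_edges (gcl : List (List (List Int))) (p0 : List Int) :
    gcl.foldl (fun acc cycles => cycles.foldl pvUnionCycle acc) (some p0)
      = (pvEdgesOf gcl).foldl pvStepA (some p0) := by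
  rw [pvEdgesOf, List.flatMap_def, List.foldl_flatten, List.foldl_map]
  apply PySem.List.foldl_congr_mem
  intro acc cs _
  rw [List.flatMap_def, List.foldl_flatten, List.foldl_map]
  apply PySem.List.foldl_congr_mem
  intro acc' c _
  exact (pvUnionCycle_eq acc' c)

lemma pvPortB_edges (gcl : List (List (List Int))) (c0 : List Int) :
    gcl.foldl (fun acc cycles =>
        cycles.foldl (fun acc2 cycle => (cycle.zip (cycle.drop 1)).foldl pvRelabel acc2) acc)
      (some c0)
      = (pvEdgesOf gcl).foldl pvRelabel (some c0) := by
  rw [pvEdgesOf, List.flatMap_def, List.foldl_flatten, List.foldl_map]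
  apply PySem.List.foldl_congr_mem
  intro acc cs _
  rw [List.flatMap_def, List.foldl_flatten, List.foldl_map]

-- ---------- the initial identity array ----------
lemma pvInit (n : Int) :
    (PySem.List.pyRange 0 (n + 1) 1).length = (n + 1).toNat ∧
    pvGoodP (PySem.List.pyRange 0 (n + 1) 1) ∧
    pvTotal (PySem.List.pyRange 0 (n + 1) 1) ∧
    pvKER (PySem.List.pyRange 0 (n + 1) 1) (PySem.List.pyRange 0 (n + 1) 1) := by
  have hlen : (PySem.List.pyRange 0 (n + 1) 1).length = (n + 1).toNat := by
    rw [PySem.List.length_pyRange_one]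
    congr 1
    omega
  have hgd : ∀ i, i < (PySem.List.pyRange 0 (n + 1) 1).length →
      (PySem.List.pyRange 0 (n + 1) 1).getD i 0 = (i : Nat) := by
    intro i hi
    rw [List.getD_eq_getElem?_getD, List.getElem?_eq_getElem hi]
    simp [PySem.List.getElem_pyRange_one]
  have hfix : ∀ i, i < (PySem.List.pyRange 0 (n + 1) 1).length →
      pvStep (PySem.List.pyRange 0 (n + 1) 1) i = i := by
    intro i hi
    unfold pvStep
    rw [hgd i hi]
    omega
  have hG : pvGoodP (PySem.List.pyRange 0 (n + 1) 1) := by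
    intro i hi
    rw [hgd i hi]
    constructor
    · omega
    · simpa using hi
  have hT : pvTotal (PySem.List.pyRange 0 (n + 1) 1) := by
    intro i hi
    exact ⟨i, ⟨⟨0, rfl⟩, hfix i hi⟩⟩
  refine ⟨hlen, hG, hT, rfl, ?_⟩
  intro i j hi hj
  have hroots : ∀ m, m < (PySem.List.pyRange 0 (n + 1) 1).length → ∀ r,
      pvIsRoot (PySem.List.pyRange 0 (n + 1) 1) m r → r = m := by
    rintro m hm r ⟨⟨k, e⟩, _⟩
    rw [← e, Function.iterate_fixed (hfix m hm)]
  constructor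
  · rintro ⟨r, h1, h2⟩
    rw [hgd i hi, hgd j hj]
    have := (hroots i hi r h1).symm.trans (hroots j hj r h2)
    exact_mod_cast this
  · intro hc
    rw [hgd i hi, hgd j hj] at hc
    have : i = j := by exact_mod_cast hc
    subst this
    exact ⟨i, ⟨⟨0, rfl⟩, hfix i hi⟩, ⟨⟨0, rfl⟩, hfix i hi⟩⟩

-- ---------- a concrete root function for the final parent array ----------
def pvRootF : Nat → List Int → Nat → Nat
  | 0, _, i => i
  | f + 1, p, i => if pvStep p i = i then i else pvRootF f p (pvStep p i)

def pvRoot (p : List Int) (i : Nat) : Nat := pvRootF p.length p i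

lemma pvRootF_spec : ∀ (f : Nat) (p : List Int) (i k r : Nat),
    (pvStep p)^[k] i = r → pvStep p r = r → k ≤ f → pvRootF f p i = r := by
  intro f
  induction f with
  | zero =>
    intro p i k r e hf hk
    have hk0 : k = 0 := by omega
    subst hk0
    simpa using e
  | succ f ihf =>
    intro p i k r e hf hk
    by_cases hfi : pvStep p i = i
    · have : r = i := by rw [← e, Function.iterate_fixed hfi]
      simp [pvRootF, hfi, this]
    · match k, e with
      | 0, e =>
        have : i = r := by simpa using e
        exact absurd (this ▸ hf) hfi
      | (k' + 1), e =>
        rw [Function.iterate_succ_apply] at e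
        simp only [pvRootF, if_neg hfi]
        exact ihf p _ k' r e hf (by omega)

lemma pvRoot_isRoot {p : List Int} (hG : pvGoodP p) (hT : pvTotal p) {i : Nat}
    (hi : i < p.length) : pvIsRoot p i (pvRoot p i) := by
  obtain ⟨r, hr⟩ := hT i hi
  obtain ⟨k, hk, e⟩ := pvReach_bound hG hi hr
  have : pvRoot p i = r := pvRootF_spec p.length p i k r e hr.2 (by omega)
  rw [this]
  exact hr

-- ---------- the counting folds ----------
def pvCStep (d : PySem.Dict Int Int) (c : Int) : PySem.Dict Int Int :=
  d.insert c (d.getD c 0 + 1)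

lemma pvCountA_fold :
    ∀ (is : List Int) (pE p : List Int) (d : PySem.Dict Int Int),
    pvGoodP pE → pvTotal pE →
    p.length = pE.length → pvGoodP p → pvTotal p →
    (∀ i, i < pE.length → ∀ r, (pvIsRoot pE i r ↔ pvIsRoot p i r)) →
    (∀ i ∈ is, 0 ≤ i ∧ i < (pE.length : Int)) →
    ∃ p', is.foldl
        (fun st i =>
          match st with
          | none => none
          | some (p, d) =>
            match pvFind p i with
            | none => none
            | some (p1, r) => some (p1, d.insert r (d.getD r 0 + 1)))
        (some (p, d))
      = some (p', (is.map (fun i => ((pvRoot pE i.toNat : Nat) : Int))).foldl pvCStep d) := by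
  intro is
  induction is with
  | nil => intro pE p d _ _ _ _ _ _ _; exact ⟨p, rfl⟩
  | cons i is ihis =>
    intro pE p d hGE hTE hlen hG hT hiff hmem
    obtain ⟨h0, hlt⟩ := hmem i (by simp)
    have hIR : PySem.Raise.InRange p.length i := by
      rw [hlen]; exact pvInRange_of_nonneg h0 hlt
    obtain ⟨p1, r, hrun, hroot, hl1, hG1, hT1, hiff1⟩ := pvFind_spec hG hT hIR
    have hnorm : pvNorm p.length i = i.toNat := pvNorm_nonneg h0
    have hitlt : i.toNat < pE.length := by omega
    have hrootE : pvIsRoot pE i.toNat r := by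
      rw [hiff _ hitlt r]
      have hroot' := hroot
      rw [hnorm] at hroot'
      exact hroot'
    have hr : r = pvRoot pE i.toNat :=
      pvIsRoot_unique hrootE (pvRoot_isRoot hGE hTE hitlt)
    obtain ⟨p', hrec⟩ := ihis pE p1 (pvCStep d ((r : Nat) : Int)) hGE hTE
      (hl1.trans hlen) hG1 hT1
      (fun m hm rr => (hiff m hm rr).trans (hiff1 m (by omega) rr))
      (fun m hm => hmem m (by simp [hm]))
    refine ⟨p', ?_⟩
    simp only [List.foldl_cons, List.map_cons, hrun]
    rw [← hr]
    exact hrec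

lemma pvCountB_fold :
    ∀ (is : List Int) (comp : List Int) (d : PySem.Dict Int Int),
    (∀ i ∈ is, 0 ≤ i ∧ i < (comp.length : Int)) →
    is.foldl
        (fun st i =>
          match st with
          | none => none
          | some (comp, d) =>
            match PySem.List.pyGet? comp i with
            | none => none
            | some c => some (comp, d.insert c (d.getD c 0 + 1)))
        (some (comp, d))
      = some (comp, (is.map (fun i => comp.getD i.toNat 0)).foldl pvCStep d) := by
  intro is
  induction is with
  | nil => intro comp d _; rfl
  | cons i is ihis =>
    intro comp d hmem
    obtain ⟨h0, hlt⟩ := hmem i (by simp)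
    have hIR : PySem.Raise.InRange comp.length i := pvInRange_of_nonneg h0 hlt
    have hget := pvGet_norm hIR
    rw [pvNorm_nonneg h0] at hget
    simp only [List.foldl_cons, List.map_cons, hget]
    exact ihis comp (pvCStep d (comp.getD i.toNat 0)) (fun m hm => hmem m (by simp [hm]))

-- ---------- the counter dictionary, characterised ----------
def pvCounter (ks : List Int) : PySem.Dict Int Int := ks.foldl pvCStep PySem.Dict.empty

lemma pvAssoc_find (l : List Int) (f : Int → Int) (k : Int) :
    List.find? (fun p => p.1 == k) (l.map (fun c => (c, f c)))
      = if k ∈ l then some (k, f k) else none := by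
  induction l with
  | nil => simp
  | cons c l ih =>
    by_cases h : c = k
    · subst h; simp
    · rw [List.map_cons, List.find?_cons_of_neg (by simpa using h), ih]
      simp [List.mem_cons, h, Ne.symm h]

lemma pvCounter_items : ∀ ks : List Int,
    (pvCounter ks).items = (PySem.Set.ofList ks).map (fun c => (c, (ks.count c : Int))) := by
  intro ks
  induction ks using List.reverseRecOn with
  | nil => rfl
  | append_singleton ks k ih =>
    have hfold : pvCounter (ks ++ [k]) = pvCStep (pvCounter ks) k := by
      rw [pvCounter, List.foldl_append]; rfl
    have hget : (pvCounter ks).get? k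
        = if k ∈ ks then some ((ks.count k : Int)) else none := by
      rw [PySem.Dict.get?, ih, pvAssoc_find]
      by_cases h : k ∈ PySem.Set.ofList ks
      · rw [if_pos h, if_pos ((PySem.Set.mem_ofList _ _).mp h)]; rfl
      · rw [if_neg h, if_neg (fun hc => h ((PySem.Set.mem_ofList _ _).mpr hc))]; rfl
    have hcont : (pvCounter ks).contains k = true ↔ k ∈ ks := by
      rw [PySem.Dict.contains, ih, List.any_map]
      constructor
      · intro h
        obtain ⟨c, hc, he⟩ := List.any_eq_true.mp h
        have : c = k := by simpa using he
        exact (PySem.Set.mem_ofList _ _).mp (this ▸ hc)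
      · intro h
        exact List.any_eq_true.mpr ⟨k, (PySem.Set.mem_ofList _ _).mpr h, by simp⟩
    by_cases hmem : k ∈ ks
    · have hc : (pvCounter ks).contains k = true := hcont.mpr hmem
      have hofl : PySem.Set.ofList (ks ++ [k]) = PySem.Set.ofList ks := by
        rw [PySem.Set.ofList_append_singleton,
          PySem.Set.add_of_mem ((PySem.Set.mem_ofList _ _).mpr hmem)]
      rw [hfold, pvCStep, PySem.Dict.items_insert_of_contains _ _ hc, ih, hofl, List.map_map]
      apply List.map_congr_left
      intro c hcm
      have hcin : c ∈ ks := (PySem.Set.mem_ofList _ _).mp hcm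
      by_cases hck : c = k
      · have hbeq : (c == k) = true := by simpa using hck
        have hgd : (pvCounter ks).getD k 0 = (ks.count k : Int) := by
          rw [PySem.Dict.getD_eq_get?_getD, hget, if_pos hmem]; rfl
        have hcnt : (ks ++ [k]).count c = ks.count k + 1 := by
          rw [hck, List.count_append]; simp
        have hval : ((ks ++ [k]).count c : Int) = (pvCounter ks).getD k 0 + 1 := by
          rw [hcnt, hgd]; push_cast; ring
        simp [Function.comp, hck, hval]
        exact hgd
      · have hne : (c == k) = false := by simpa using hck
        have hcnt : (ks ++ [k]).count c = ks.count c := by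
          rw [List.count_append]
          simp [List.count_singleton, beq_iff_eq, Ne.symm hck]
        simp [Function.comp, hne, hcnt]
    · have hc : (pvCounter ks).contains k = false := by
        cases h : (pvCounter ks).contains k with
        | false => rfl
        | true => exact absurd (hcont.mp h) hmem
      have hofl : PySem.Set.ofList (ks ++ [k]) = PySem.Set.ofList ks ++ [k] := by
        rw [PySem.Set.ofList_append_singleton,
          PySem.Set.add_of_not_mem (fun hc' => hmem ((PySem.Set.mem_ofList _ _).mp hc'))]
      have hgd : (pvCounter ks).getD k 0 = 0 := by
        rw [PySem.Dict.getD_eq_get?_getD, hget, if_neg hmem]; rfl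
      rw [hfold, pvCStep, PySem.Dict.items_insert_of_not_contains _ _ hc, ih, hofl,
        List.map_append, hgd]
      congr 1
      · apply List.map_congr_left
        intro c hcm
        have hcin : c ∈ ks := (PySem.Set.mem_ofList _ _).mp hcm
        have hck : c ≠ k := fun h => hmem (h ▸ hcin)
        have : (ks ++ [k]).count c = ks.count c := by
          rw [List.count_append]
          simp [List.count_singleton, beq_iff_eq, Ne.symm hck]
        rw [this]
      · have : (ks ++ [k]).count k = ks.count k + 1 := by
          rw [List.count_append]; simp
        rw [List.map_singleton, this, List.count_eq_zero_of_not_mem hmem]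
        norm_num

lemma pvCounter_values (ks : List Int) :
    (pvCounter ks).values = (PySem.Set.ofList ks).map (fun c => (ks.count c : Int)) := by
  rw [PySem.Dict.values, pvCounter_items, List.map_map]
  rfl

-- ---------- same key pattern means the same value list ----------
lemma pvCount_index (ks : List Int) (a : Int) :
    ks.count a = (List.range ks.length).countP (fun m => ks.getD m 0 == a) := by
  induction ks using List.reverseRecOn with
  | nil => simp
  | append_singleton ks x ih =>
    rw [List.count_append, List.length_append, List.length_singleton, List.range_succ,
      List.countP_append]
    congr 1
    · rw [ih]
      apply List.countP_congr
      intro m hm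
      have hm' : m < ks.length := List.mem_range.mp hm
      rw [List.getD_append _ _ _ _ hm']
    · have hx : (ks ++ [x]).getD ks.length 0 = x := by
        rw [List.getD_eq_getElem?_getD, List.getElem?_concat_length]; rfl
      simp [List.count_singleton, hx]

lemma pvMem_iff_index (ks : List Int) (a : Int) :
    a ∈ ks ↔ ∃ t, t < ks.length ∧ ks.getD t 0 = a := by
  constructor
  · intro h
    obtain ⟨n, hn, e⟩ := List.getElem_of_mem h
    exact ⟨n, hn, by rw [List.getD_eq_getElem _ _ hn, e]⟩
  · rintro ⟨t, ht, e⟩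
    rw [← e, List.getD_eq_getElem _ _ ht]
    exact List.getElem_mem ht

lemma pvReps_take :
    ∀ (m : Nat) (ks1 ks2 : List Int), m ≤ ks1.length → ks1.length = ks2.length →
    (∀ t t', t < ks1.length → t' < ks1.length →
      (ks1.getD t 0 = ks1.getD t' 0 ↔ ks2.getD t 0 = ks2.getD t' 0)) →
    ∃ reps : List Nat, (∀ t ∈ reps, t < m) ∧
      PySem.Set.ofList (ks1.take m) = reps.map (fun t => ks1.getD t 0) ∧
      PySem.Set.ofList (ks2.take m) = reps.map (fun t => ks2.getD t 0) := by
  intro m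
  induction m with
  | zero => intro ks1 ks2 _ _ _; exact ⟨[], by simp, by simp, by simp⟩
  | succ m ihm =>
    intro ks1 ks2 hm hlen hker
    obtain ⟨reps, hb, h1, h2⟩ := ihm ks1 ks2 (by omega) hlen hker
    have hm1 : m < ks1.length := by omega
    have hm2 : m < ks2.length := by omega
    have htake1 : ks1.take (m + 1) = ks1.take m ++ [ks1.getD m 0] := by
      rw [List.take_succ, List.getElem?_eq_getElem hm1, List.getD_eq_getElem _ _ hm1]
      rfl
    have htake2 : ks2.take (m + 1) = ks2.take m ++ [ks2.getD m 0] := by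
      rw [List.take_succ, List.getElem?_eq_getElem hm2, List.getD_eq_getElem _ _ hm2]
      rfl
    have hgdtake : ∀ (ks : List Int) (t : Nat), t < m →
        (ks.take m).getD t 0 = ks.getD t 0 := by
      intro ks t ht
      rw [List.getD_eq_getElem?_getD, List.getElem?_take, if_pos ht, ← List.getD_eq_getElem?_getD]
    have hmemtake : ∀ (ks : List Int), m ≤ ks.length →
        (ks.getD m 0 ∈ ks.take m ↔ ∃ t, t < m ∧ ks.getD t 0 = ks.getD m 0) := by
      intro ks hmk
      rw [pvMem_iff_index]
      constructor
      · rintro ⟨t, ht, e⟩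
        rw [List.length_take] at ht
        have htm : t < m := by omega
        exact ⟨t, htm, by rw [← hgdtake ks t htm]; exact e⟩
      · rintro ⟨t, ht, e⟩
        refine ⟨t, ?_, ?_⟩
        · rw [List.length_take]
          omega
        · rw [hgdtake ks t ht]
          exact e
    have hkermem : ks1.getD m 0 ∈ ks1.take m ↔ ks2.getD m 0 ∈ ks2.take m := by
      rw [hmemtake ks1 (by omega), hmemtake ks2 (by omega)]
      constructor
      · rintro ⟨t, ht, e⟩
        exact ⟨t, ht, (hker t m (by omega) hm1).mp e⟩
      · rintro ⟨t, ht, e⟩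
        exact ⟨t, ht, (hker t m (by omega) hm1).mpr e⟩
    rw [htake1, htake2, PySem.Set.ofList_append_singleton, PySem.Set.ofList_append_singleton]
    by_cases hin : ks1.getD m 0 ∈ ks1.take m
    · have hin2 : ks2.getD m 0 ∈ ks2.take m := hkermem.mp hin
      rw [PySem.Set.add_of_mem ((PySem.Set.mem_ofList _ _).mpr hin),
        PySem.Set.add_of_mem ((PySem.Set.mem_ofList _ _).mpr hin2)]
      exact ⟨reps, fun t ht => by have := hb t ht; omega, h1, h2⟩
    · have hin2 : ks2.getD m 0 ∉ ks2.take m := fun h => hin (hkermem.mpr h)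
      rw [PySem.Set.add_of_not_mem (fun h => hin ((PySem.Set.mem_ofList _ _).mp h)),
        PySem.Set.add_of_not_mem (fun h => hin2 ((PySem.Set.mem_ofList _ _).mp h))]
      refine ⟨reps ++ [m], ?_, ?_, ?_⟩
      · intro t ht
        rcases List.mem_append.mp ht with h | h
        · have := hb t h; omega
        · have : t = m := by simpa using h
          omega
      · rw [List.map_append, h1]; rfl
      · rw [List.map_append, h2]; rfl

lemma pvValues_eq (ks1 ks2 : List Int) (hlen : ks1.length = ks2.length)
    (hker : ∀ t t', t < ks1.length → t' < ks1.length →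
      (ks1.getD t 0 = ks1.getD t' 0 ↔ ks2.getD t 0 = ks2.getD t' 0)) :
    (PySem.Set.ofList ks1).map (fun c => (ks1.count c : Int))
      = (PySem.Set.ofList ks2).map (fun c => (ks2.count c : Int)) := by
  obtain ⟨reps, hb, h1, h2⟩ := pvReps_take ks1.length ks1 ks2 le_rfl hlen hker
  rw [List.take_length] at h1
  rw [hlen, List.take_length] at h2
  rw [h1, h2, List.map_map, List.map_map]
  apply List.map_congr_left
  intro t ht
  have htl : t < ks1.length := hb t ht
  simp only [Function.comp_apply]
  congr 1
  rw [pvCount_index, pvCount_index, ← hlen]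
  apply List.countP_congr
  intro q hq
  have hq' : q < ks1.length := List.mem_range.mp hq
  simp only [beq_iff_eq]
  exact hker q t hq' htl

-- ---------- assembling the two ports ----------
lemma pvRoot_eq_iff {p : List Int} (hG : pvGoodP p) (hT : pvTotal p) {a b : Nat}
    (ha : a < p.length) (hb : b < p.length) :
    pvRoot p a = pvRoot p b ↔ pvSame p a b := by
  constructor
  · intro h
    exact ⟨pvRoot p a, pvRoot_isRoot hG hT ha, h ▸ pvRoot_isRoot hG hT hb⟩
  · intro h
    exact pvSame_root_eq h (pvRoot_isRoot hG hT ha) (pvRoot_isRoot hG hT hb)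

lemma pvGetD_mem {l : List Int} {t : Nat} (ht : t < l.length) : l.getD t 0 ∈ l := by
  rw [List.getD_eq_getElem _ _ ht]
  exact List.getElem_mem ht

-- ===== VERDICT (by name: the statement is the Claim_ definition above) =====
theorem orbit_type_from_cycles_spec : Claim_equal_orbit_type_from_cycles := by
  intro gcl n _ hpre
  unfold Spec_orbit_type_from_cycles
  obtain ⟨hlen0, hG0, hT0, hker0⟩ := pvInit n
  have hedges : ∀ e ∈ pvEdgesOf gcl,
      PySem.Raise.InRange (PySem.List.pyRange 0 (n + 1) 1).length e.1 ∧
      PySem.Raise.InRange (PySem.List.pyRange 0 (n + 1) 1).length e.2 := by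
    intro e he
    obtain ⟨cs, hcs, he1⟩ := List.mem_flatMap.mp he
    obtain ⟨c, hc, he2⟩ := List.mem_flatMap.mp he1
    obtain ⟨ha, hb⟩ := List.of_mem_zip (show (e.1, e.2) ∈ c.zip (c.drop 1) from he2)
    have hblen : 1 < c.length := by
      have hpos := List.length_pos_of_mem he2
      rw [List.length_zip, List.length_drop] at hpos
      omega
    have hb' : e.2 ∈ c := List.mem_of_mem_drop hb
    obtain ⟨ha1, ha2⟩ := hpre cs hcs c hc hblen e.1 ha
    obtain ⟨hb1, hb2⟩ := hpre cs hcs c hc hblen e.2 hb'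
    rw [hlen0]
    constructor <;> constructor <;> omega
  obtain ⟨pE, compE, hfoldA, hfoldB, hlenE, hGE, hTE, hkerE⟩ :=
    pvEdges_fold (pvEdgesOf gcl) (PySem.List.pyRange 0 (n + 1) 1)
      (PySem.List.pyRange 0 (n + 1) 1) hG0 hT0 hker0 hedges
  have hisb : ∀ i ∈ PySem.List.pyRange 1 (n + 1) 1, 0 ≤ i ∧ i < (pE.length : Int) := by
    intro i hi
    obtain ⟨h1, h2⟩ := PySem.List.mem_pyRange_one.mp hi
    rw [hlenE, hlen0]
    omega
  obtain ⟨pF, hcntA⟩ := pvCountA_fold (PySem.List.pyRange 1 (n + 1) 1) pE pE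
    PySem.Dict.empty hGE hTE rfl hGE hTE (fun i hi r => Iff.rfl) hisb
  have hisbB : ∀ i ∈ PySem.List.pyRange 1 (n + 1) 1, 0 ≤ i ∧ i < (compE.length : Int) := by
    intro i hi
    rw [hkerE.1]
    exact hisb i hi
  have hcntB := pvCountB_fold (PySem.List.pyRange 1 (n + 1) 1) compE PySem.Dict.empty hisbB
  -- the two key sequences induce the same partition of positions
  have hvals :
      (PySem.Set.ofList ((PySem.List.pyRange 1 (n + 1) 1).map
          (fun i => ((pvRoot pE i.toNat : Nat) : Int)))).map
        (fun c => ((((PySem.List.pyRange 1 (n + 1) 1).map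
          (fun i => ((pvRoot pE i.toNat : Nat) : Int))).count c : Nat) : Int))
      = (PySem.Set.ofList ((PySem.List.pyRange 1 (n + 1) 1).map
          (fun i => compE.getD i.toNat 0))).map
        (fun c => ((((PySem.List.pyRange 1 (n + 1) 1).map
          (fun i => compE.getD i.toNat 0)).count c : Nat) : Int)) := by
    apply pvValues_eq
    · simp
    · intro t t' ht ht'
      rw [List.length_map] at ht
      have ht'2 : t' < (PySem.List.pyRange 1 (n + 1) 1).length := by
        rw [List.length_map] at ht'; exact ht'
      rw [pvGetD_map ht, pvGetD_map ht, pvGetD_map ht'2, pvGetD_map ht'2]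
      have hm1 := pvGetD_mem ht
      have hm2 := pvGetD_mem ht'2
      obtain ⟨hp1, hp2⟩ := hisb _ hm1
      obtain ⟨hq1, hq2⟩ := hisb _ hm2
      have hb1 : ((PySem.List.pyRange 1 (n + 1) 1).getD t 0).toNat < pE.length := by omega
      have hb2 : ((PySem.List.pyRange 1 (n + 1) 1).getD t' 0).toNat < pE.length := by omega
      rw [Int.natCast_inj, pvRoot_eq_iff hGE hTE hb1 hb2, hkerE.2 _ _ hb1 hb2]
  -- unfold both ports and chain the characterisations
  show orbit_type_from_cycles gcl n = orbit_type_from_cycles_alt gcl n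
  rw [orbit_type_from_cycles, orbit_type_from_cycles_alt]
  rw [pvPortA_edges, pvPortB_edges, hfoldA, hfoldB]
  simp only [Option.map_some]
  rw [hcntA, hcntB]
  have h1 : ((PySem.List.pyRange 1 (n + 1) 1).map
      (fun i => ((pvRoot pE i.toNat : Nat) : Int))).foldl pvCStep PySem.Dict.empty
      = pvCounter ((PySem.List.pyRange 1 (n + 1) 1).map
        (fun i => ((pvRoot pE i.toNat : Nat) : Int))) := rfl
  have h2 : ((PySem.List.pyRange 1 (n + 1) 1).map
      (fun i => compE.getD i.toNat 0)).foldl pvCStep PySem.Dict.empty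
      = pvCounter ((PySem.List.pyRange 1 (n + 1) 1).map
        (fun i => compE.getD i.toNat 0)) := rfl
  rw [h1, h2]
  have hfin : (pvCounter ((PySem.List.pyRange 1 (n + 1) 1).map
        (fun i => ((pvRoot pE i.toNat : Nat) : Int)))).values
      = (pvCounter ((PySem.List.pyRange 1 (n + 1) 1).map
        (fun i => compE.getD i.toNat 0))).values := by
    rw [pvCounter_values, pvCounter_values]
    exact hvals
  simp only [hfin]
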